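-- pv_equiv track=rewrite | github.com/HSJung93/-Python-CodingPractices | bank/dev-match-2021-2.py | solution
-- ===== SOURCE A (Python) =====
-- def solution(leave, day, holidays):
--     answer = -1
--     # 0일의 값은 나중에 제거
--     calendar = [1] * 31
--
--     days = {"SUN":0, "MON":6, "TUE":5, "WEN":4, "THU":3, "FRI":2, "SAT":1}
--
--     free = days[day]
--
--     for i in range(31):
--         if i % 7 == free or i % 7 == ((free + 1)% 7):
--             calendar[i] = 0
--
--     for i in holidays:
--         calendar[i] = 0
--
--     # 29 까지
--     cal = calendar[1:]
--     sm = 0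
--     mx = 0
--
--     for i in range(len(cal)-1):
--         sm = cal[i]
--         for j in range(i+1, len(cal)):
--             sm += cal[j]
--             # 개선 가능
--             if sm <= leave:
--
--                 mx = max(mx, j-i+1)
--             else:
--               break
--
--     return mx
-- ===== SOURCE B (Python) =====
-- def solution(leave, day, holidays):
--     days = {"SUN": 0, "MON": 6, "TUE": 5, "WEN": 4, "THU": 3, "FRI": 2, "SAT": 1}
--     free = days[day]
--     calendar = [1] * 31
--     for i in range(31):
--         if i % 7 == free or i % 7 == (free + 1) % 7:
--             calendar[i] = 0
--     for i in holidays: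
--         calendar[i] = 0
--     cal = calendar[1:]
--     # single-pass two-pointer over cal instead of A's nested scan
--     mx = 0
--     sm = 0
--     l = 0
--     for r in range(len(cal)):
--         sm += cal[r]
--         while sm > leave and l <= r:
--             sm -= cal[l]
--             l += 1
--         if r - l + 1 >= 2:
--             mx = max(mx, r - l + 1)
--     return mx
-- ===== Notes on version B (the rewrite author's own statement) =====
-- stated objective: alternative
-- what changed: The nested O(n^2) max-window scan over the 30-day calendar is replaced by a single-pass two-pointer sweep (running window sum with a moving left edge); the calendar-building phase is kept unchanged.
import Mathlib
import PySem

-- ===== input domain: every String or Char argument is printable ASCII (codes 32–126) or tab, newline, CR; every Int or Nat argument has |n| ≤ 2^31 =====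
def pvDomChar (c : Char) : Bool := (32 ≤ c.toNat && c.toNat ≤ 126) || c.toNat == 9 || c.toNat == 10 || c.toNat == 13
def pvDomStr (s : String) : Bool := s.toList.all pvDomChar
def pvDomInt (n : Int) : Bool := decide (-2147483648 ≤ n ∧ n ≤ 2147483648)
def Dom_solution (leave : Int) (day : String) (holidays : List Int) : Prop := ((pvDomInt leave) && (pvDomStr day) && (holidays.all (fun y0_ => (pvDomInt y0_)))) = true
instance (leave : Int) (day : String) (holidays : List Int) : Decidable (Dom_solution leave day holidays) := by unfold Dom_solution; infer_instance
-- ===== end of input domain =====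

-- B replaces A's nested O(n^2) window scan by a single-pass two-pointer sweep over the same
-- calendar (the calendar-building phase is identical in both); equivalence is proved for all inputs
-- on which A returns (Pre_: known weekday key, holiday indices in range).

-- ===== PORT A =====

-- the calendar-building phase, textually identical in Source A and Source B (shared helper)
def pvDays : PySem.Dict String Int :=
  PySem.Dict.ofList [("SUN",0),("MON",6),("TUE",5),("WEN",4),("THU",3),("FRI",2),("SAT",1)]

def buildCal (day : String) (holidays : List Int) : List Int :=
  -- free = days[day]; KeyError when day is not a key (excluded by Pre_), getD's default is then irrelevant
  let free := (pvDays.get? day).getD 0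
  -- calendar = [1]*31; for i in range(31): if i%7==free or i%7==(free+1)%7: calendar[i]=0
  let calendar := (List.range 31).foldl
    (fun c i => if PySem.Int.mod (i : Int) 7 = free ∨ PySem.Int.mod (i : Int) 7 = PySem.Int.mod (free + 1) 7
                then PySem.List.pySetD c (i : Int) 0 else c)
    (List.replicate 31 (1 : Int))
  -- for i in holidays: calendar[i] = 0   (IndexError for out-of-range i: excluded by Pre_)
  let calendar := holidays.foldl (fun c h => PySem.List.pySetD c h 0) calendar
  -- cal = calendar[1:]
  PySem.List.slice calendar (some 1) none

-- inner loop of A: for j in range(i+1, len(cal)): sm += cal[j]; if sm<=leave: mx=max(mx,j-i+1) else: break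
-- (cal.getD j 0 is cal[j]: j is a nonnegative in-range index here — exact)
def innerA (leave : Int) (cal : List Int) (i j : Nat) (sm mx : Int) : Int :=
  if j < cal.length then
    let sm' := sm + cal.getD j 0
    if sm' ≤ leave then innerA leave cal i (j+1) sm' (max mx ((j : Int) - (i : Int) + 1))
    else mx
  else mx
termination_by cal.length - j

-- outer loop of A: for i in range(len(cal)-1): sm = cal[i]; <inner loop>
def outerA (leave : Int) (cal : List Int) (i : Nat) (mx : Int) : Int :=
  if i < cal.length - 1 then
    outerA leave cal (i+1) (innerA leave cal i (i+1) (cal.getD i 0) mx)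
  else mx
termination_by cal.length - 1 - i

def solution (leave : Int) (day : String) (holidays : List Int) : Int :=
  outerA leave (buildCal day holidays) 0 0

-- ===== PORT B =====

-- while sm > leave and l <= r: sm -= cal[l]; l += 1
def dropB (leave : Int) (cal : List Int) (r l : Nat) (sm : Int) : Nat × Int :=
  if leave < sm ∧ l ≤ r then dropB leave cal r (l+1) (sm - cal.getD l 0)
  else (l, sm)
termination_by r + 1 - l

-- for r in range(len(cal)): sm += cal[r]; <while>; if r-l+1 >= 2: mx = max(mx, r-l+1)
def sweepB (leave : Int) (cal : List Int) (r l : Nat) (sm mx : Int) : Int :=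
  if r < cal.length then
    let sm1 := sm + cal.getD r 0
    let p := dropB leave cal r l sm1
    let mx1 := if (2 : Int) ≤ (r : Int) - (p.1 : Int) + 1 then max mx ((r : Int) - (p.1 : Int) + 1) else mx
    sweepB leave cal (r+1) p.1 p.2 mx1
  else mx
termination_by cal.length - r

def solution_alt (leave : Int) (day : String) (holidays : List Int) : Int :=
  sweepB leave (buildCal day holidays) 0 0 0 0

-- ===== PRECONDITION & SPEC =====
-- Pre_ excludes exactly the inputs on which A raises: an unknown weekday string (KeyError on days[day])
-- and a holiday index outside the valid index range of the 31-day calendar (IndexError on calendar[i]=0).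
def Pre_solution (leave : Int) (day : String) (holidays : List Int) : Prop :=
  day ∈ ["SUN","MON","TUE","WEN","THU","FRI","SAT"] ∧ ∀ h ∈ holidays, -(31:Int) ≤ h ∧ h < 31
instance (leave : Int) (day : String) (holidays : List Int) : Decidable (Pre_solution leave day holidays) := by
  unfold Pre_solution; infer_instance

def pvWitness_solution : Int × String × List Int := (3, "MON", [15, -2])

def Spec_solution (leave : Int) (day : String) (holidays : List Int) (out : Int) : Prop := out = solution_alt leave day holidays
instance (leave : Int) (day : String) (holidays : List Int) (out : Int) : Decidable (Spec_solution leave day holidays out) := by unfold Spec_solution; infer_instance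

-- ===== CLAIM (what is proved, stated in full; the proofs are below) =====
def Claim_equal_solution : Prop := ∀ (leave : Int) (day : String) (holidays : List Int), Dom_solution leave day holidays → Pre_solution leave day holidays → Spec_solution leave day holidays (solution leave day holidays)

-- ===== LEMMAS AND PROOFS =====

-- prefix sums of the calendar
def pref (c : List Int) (k : Nat) : Int := (c.take k).sum

-- a valid window: cal[i:e] has length ≥ 2, lies inside cal, and its sum is within the leave budget
def Ok (leave : Int) (c : List Int) (i e : Nat) : Prop :=
  i + 2 ≤ e ∧ e ≤ c.length ∧ pref c e - pref c i ≤ leave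

lemma pref_succ (c : List Int) (k : Nat) : pref c (k+1) = pref c k + c.getD k 0 := by
  unfold pref
  rcases Nat.lt_or_ge k c.length with h | h
  · rw [List.sum_take_succ _ _ h, List.getD_eq_getElem _ _ h]
  · rw [List.take_of_length_le h, List.take_of_length_le (le_trans h (by omega)),
      List.getD_eq_default _ _ h]
    ring

lemma getD_nonneg {c : List Int} (hn : ∀ x ∈ c, 0 ≤ x) (k : Nat) : 0 ≤ c.getD k 0 := by
  rcases Nat.lt_or_ge k c.length with h | h
  · rw [List.getD_eq_getElem _ _ h]; exact hn _ (List.getElem_mem h)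
  · rw [List.getD_eq_default _ _ h]

lemma pref_mono {c : List Int} (hn : ∀ x ∈ c, 0 ≤ x) {k k' : Nat} (h : k ≤ k') :
    pref c k ≤ pref c k' := by
  induction k', h using Nat.le_induction with
  | base => exact le_refl _
  | succ m hm ih => rw [pref_succ]; have := getD_nonneg hn m; omega

lemma mem_pySetD {c : List Int} {h v x : Int} (hx : x ∈ PySem.List.pySetD c h v) :
    x = v ∨ x ∈ c := by
  unfold PySem.List.pySetD PySem.List.pySet? at hx
  cases hidx : PySem.List.pyIdx? c.length h with
  | none => rw [hidx] at hx; simp at hx; exact Or.inr hx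
  | some k =>
    rw [hidx] at hx; simp at hx
    rcases List.mem_or_eq_of_mem_set hx with h2 | h2
    · exact Or.inr h2
    · exact Or.inl h2

lemma pySetD0_nonneg {c : List Int} (hc : ∀ x ∈ c, 0 ≤ x) (h : Int) :
    ∀ x ∈ PySem.List.pySetD c h 0, 0 ≤ x := by
  intro x hx
  rcases mem_pySetD hx with rfl | hmem
  · exact le_refl 0
  · exact hc x hmem

lemma buildCal_nonneg (day : String) (holidays : List Int) :
    ∀ x ∈ buildCal day holidays, 0 ≤ x := by
  intro x hx
  simp only [buildCal] at hx
  have hx1 := PySem.List.mem_of_mem_slice _ _ _ hx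
  have hbase : ∀ x ∈ (List.range 31).foldl
      (fun c (i : Nat) => if PySem.Int.mod (i : Int) 7 = (pvDays.get? day).getD 0 ∨
          PySem.Int.mod (i : Int) 7 = PySem.Int.mod ((pvDays.get? day).getD 0 + 1) 7
        then PySem.List.pySetD c (i : Int) 0 else c)
      (List.replicate 31 (1 : Int)), 0 ≤ x := by
    refine List.foldlRecOn (motive := fun c => ∀ x ∈ c, 0 ≤ x) _ _ ?_ (fun c hc i _ => ?_)
    · intro y hy; rw [List.eq_of_mem_replicate hy]; exact Int.one_nonneg
    · dsimp only; split
      · exact pySetD0_nonneg hc _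
      · exact hc
  exact List.foldlRecOn (motive := fun c => ∀ x ∈ c, 0 ≤ x) holidays _ hbase
    (fun c hc h _ => pySetD0_nonneg hc h) x hx1

lemma inner_char (leave : Int) (c : List Int) (hn : ∀ x ∈ c, 0 ≤ x) (i : Nat) :
    ∀ j sm mx, i < j → sm = pref c j - pref c i →
      mx ≤ innerA leave c i j sm mx ∧
      (innerA leave c i j sm mx = mx ∨
        ∃ e, j < e ∧ Ok leave c i e ∧ innerA leave c i j sm mx = (e : Int) - (i : Int)) ∧
      (∀ e, j < e → Ok leave c i e → (e : Int) - (i : Int) ≤ innerA leave c i j sm mx) := by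
  suffices H : ∀ fuel j sm mx, c.length - j ≤ fuel → i < j → sm = pref c j - pref c i →
      mx ≤ innerA leave c i j sm mx ∧
      (innerA leave c i j sm mx = mx ∨
        ∃ e, j < e ∧ Ok leave c i e ∧ innerA leave c i j sm mx = (e : Int) - (i : Int)) ∧
      (∀ e, j < e → Ok leave c i e → (e : Int) - (i : Int) ≤ innerA leave c i j sm mx) by
    exact fun j sm mx => H (c.length - j) j sm mx le_rfl
  intro fuel
  induction fuel with
  | zero =>
    intro j sm mx hf hij hsm
    have hj : ¬ j < c.length := by omega
    rw [innerA, if_neg hj]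
    refine ⟨le_refl _, Or.inl rfl, fun e he hok => ?_⟩
    rcases hok with ⟨_, h2, _⟩; omega
  | succ n ih =>
    intro j sm mx hf hij hsm
    by_cases hj : j < c.length
    · rw [innerA, if_pos hj]
      dsimp only
      by_cases hle : sm + c.getD j 0 ≤ leave
      · rw [if_pos hle]
        have hsm' : sm + c.getD j 0 = pref c (j+1) - pref c i := by
          rw [pref_succ]; omega
        obtain ⟨ih1, ih2, ih3⟩ := ih (j+1) _ _ (by omega) (by omega) hsm'
        have hok1 : Ok leave c i (j+1) := ⟨by omega, by omega, by omega⟩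
        constructor
        · exact le_trans (le_max_left _ _) ih1
        constructor
        · rcases ih2 with heq | ⟨e, he1, he2, he3⟩
          · rcases max_choice mx ((j:Int) - i + 1) with hm | hm
            · exact Or.inl (heq.trans hm)
            · exact Or.inr ⟨j+1, by omega, hok1, by rw [heq, hm]; push_cast; ring⟩
          · exact Or.inr ⟨e, by omega, he2, he3⟩
        · intro e he hok
          rcases Nat.eq_or_lt_of_le (Nat.succ_le_of_lt he) with heq | hlt
          · have : (e:Int) - i = (j:Int) - i + 1 := by omega
            rw [this]
            exact le_trans (le_max_right _ _) ih1
          · exact ih3 e hlt hok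
      · rw [if_neg hle]
        refine ⟨le_refl _, Or.inl rfl, fun e he hok => ?_⟩
        exfalso
        rcases hok with ⟨_, h2, h3⟩
        have hmono : pref c (j+1) ≤ pref c e := pref_mono hn (by omega)
        have := pref_succ c j
        omega
    · rw [innerA, if_neg hj]
      refine ⟨le_refl _, Or.inl rfl, fun e he hok => ?_⟩
      rcases hok with ⟨_, h2, _⟩; omega

lemma outer_char (leave : Int) (c : List Int) (hn : ∀ x ∈ c, 0 ≤ x) :
    ∀ i0 mx,
      (mx = 0 ∨ ∃ i e, i < i0 ∧ Ok leave c i e ∧ mx = (e : Int) - (i : Int)) →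
      (∀ i e, i < i0 → Ok leave c i e → (e : Int) - (i : Int) ≤ mx) →
      (outerA leave c i0 mx = 0 ∨
        ∃ i e, Ok leave c i e ∧ outerA leave c i0 mx = (e : Int) - (i : Int)) ∧
      (∀ i e, Ok leave c i e → (e : Int) - (i : Int) ≤ outerA leave c i0 mx) := by
  suffices H : ∀ fuel i0 mx, c.length - 1 - i0 ≤ fuel →
      (mx = 0 ∨ ∃ i e, i < i0 ∧ Ok leave c i e ∧ mx = (e : Int) - (i : Int)) →
      (∀ i e, i < i0 → Ok leave c i e → (e : Int) - (i : Int) ≤ mx) →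
      (outerA leave c i0 mx = 0 ∨
        ∃ i e, Ok leave c i e ∧ outerA leave c i0 mx = (e : Int) - (i : Int)) ∧
      (∀ i e, Ok leave c i e → (e : Int) - (i : Int) ≤ outerA leave c i0 mx) by
    exact fun i0 mx => H (c.length - 1 - i0) i0 mx le_rfl
  intro fuel
  induction fuel with
  | zero =>
    intro i0 mx hf h1 h2
    have hi0 : ¬ i0 < c.length - 1 := by omega
    rw [outerA, if_neg hi0]
    constructor
    · rcases h1 with h | ⟨i, e, _, hok, heq⟩
      · exact Or.inl h
      · exact Or.inr ⟨i, e, hok, heq⟩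
    · intro i e hok
      refine h2 i e ?_ hok
      rcases hok with ⟨ha, hb, _⟩; omega
  | succ n ih =>
    intro i0 mx hf h1 h2
    by_cases hi0 : i0 < c.length - 1
    · rw [outerA, if_pos hi0]
      have hsm : c.getD i0 0 = pref c (i0+1) - pref c i0 := by
        rw [pref_succ]; ring
      have hfn : c.length - 1 - (i0+1) ≤ n := by omega
      obtain ⟨j1, j2, j3⟩ := inner_char leave c hn i0 (i0+1) _ mx (by omega) hsm
      refine ih (i0+1) (innerA leave c i0 (i0+1) (c.getD i0 0) mx) hfn ?_ ?_
      · rcases j2 with heq | ⟨e, he1, he2, he3⟩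
        · rw [heq]
          rcases h1 with h | ⟨i, e, hi, hok, heq'⟩
          · exact Or.inl h
          · exact Or.inr ⟨i, e, by omega, hok, heq'⟩
        · exact Or.inr ⟨i0, e, by omega, he2, he3⟩
      · intro i e hi hok
        rcases Nat.lt_succ_iff_lt_or_eq.mp hi with hlt | rfl
        · exact le_trans (h2 i e hlt hok) j1
        · refine j3 e ?_ hok
          rcases hok with ⟨ha, _, _⟩; omega
    · rw [outerA, if_neg hi0]
      constructor
      · rcases h1 with h | ⟨i, e, _, hok, heq⟩
        · exact Or.inl h
        · exact Or.inr ⟨i, e, hok, heq⟩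
      · intro i e hok
        refine h2 i e ?_ hok
        rcases hok with ⟨ha, hb, _⟩; omega

lemma drop_char (leave : Int) (c : List Int) (r : Nat) :
    ∀ l sm, l ≤ r + 1 → sm = pref c (r+1) - pref c l →
      (∀ l' < l, leave < pref c (r+1) - pref c l') →
      l ≤ (dropB leave c r l sm).1 ∧ (dropB leave c r l sm).1 ≤ r + 1 ∧
      (dropB leave c r l sm).2 = pref c (r+1) - pref c (dropB leave c r l sm).1 ∧
      (∀ l' < (dropB leave c r l sm).1, leave < pref c (r+1) - pref c l') ∧
      ((dropB leave c r l sm).2 ≤ leave ∨ (dropB leave c r l sm).1 = r + 1) := by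
  suffices H : ∀ fuel l sm, r + 1 - l ≤ fuel → l ≤ r + 1 → sm = pref c (r+1) - pref c l →
      (∀ l' < l, leave < pref c (r+1) - pref c l') →
      l ≤ (dropB leave c r l sm).1 ∧ (dropB leave c r l sm).1 ≤ r + 1 ∧
      (dropB leave c r l sm).2 = pref c (r+1) - pref c (dropB leave c r l sm).1 ∧
      (∀ l' < (dropB leave c r l sm).1, leave < pref c (r+1) - pref c l') ∧
      ((dropB leave c r l sm).2 ≤ leave ∨ (dropB leave c r l sm).1 = r + 1) by
    exact fun l sm => H (r + 1 - l) l sm le_rfl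
  intro fuel
  induction fuel with
  | zero =>
    intro l sm hf hl hsm hmin
    have hcond : ¬ (leave < sm ∧ l ≤ r) := by omega
    rw [dropB, if_neg hcond]
    exact ⟨le_refl l, hl, hsm, hmin, by omega⟩
  | succ n ih =>
    intro l sm hf hl hsm hmin
    by_cases hcond : leave < sm ∧ l ≤ r
    · rw [dropB, if_pos hcond]
      have hstep : sm - c.getD l 0 = pref c (r+1) - pref c (l+1) := by
        have := pref_succ c l; omega
      have hmin1 : ∀ l' < l + 1, leave < pref c (r+1) - pref c l' := by
        intro l' hl'
        rcases Nat.lt_succ_iff_lt_or_eq.mp hl' with h | rfl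
        · exact hmin l' h
        · omega
      obtain ⟨a1, a2, a3, a4, a5⟩ := ih (l+1) _ (by omega) (by omega) hstep hmin1
      exact ⟨by omega, a2, a3, a4, a5⟩
    · rw [dropB, if_neg hcond]
      exact ⟨le_refl l, hl, hsm, hmin, by omega⟩

lemma sweep_char (leave : Int) (c : List Int) (hn : ∀ x ∈ c, 0 ≤ x) :
    ∀ r0 l sm mx, l ≤ r0 → sm = pref c r0 - pref c l →
      (∀ l' < l, leave < pref c r0 - pref c l') →
      (mx = 0 ∨ ∃ i e, e ≤ r0 ∧ Ok leave c i e ∧ mx = (e : Int) - (i : Int)) →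
      (∀ i e, Ok leave c i e → e ≤ r0 → (e : Int) - (i : Int) ≤ mx) →
      (sweepB leave c r0 l sm mx = 0 ∨
        ∃ i e, Ok leave c i e ∧ sweepB leave c r0 l sm mx = (e : Int) - (i : Int)) ∧
      (∀ i e, Ok leave c i e → (e : Int) - (i : Int) ≤ sweepB leave c r0 l sm mx) := by
  suffices H : ∀ fuel r0 l sm mx, c.length - r0 ≤ fuel → l ≤ r0 → sm = pref c r0 - pref c l →
      (∀ l' < l, leave < pref c r0 - pref c l') →
      (mx = 0 ∨ ∃ i e, e ≤ r0 ∧ Ok leave c i e ∧ mx = (e : Int) - (i : Int)) →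
      (∀ i e, Ok leave c i e → e ≤ r0 → (e : Int) - (i : Int) ≤ mx) →
      (sweepB leave c r0 l sm mx = 0 ∨
        ∃ i e, Ok leave c i e ∧ sweepB leave c r0 l sm mx = (e : Int) - (i : Int)) ∧
      (∀ i e, Ok leave c i e → (e : Int) - (i : Int) ≤ sweepB leave c r0 l sm mx) by
    exact fun r0 l sm mx => H (c.length - r0) r0 l sm mx le_rfl
  intro fuel
  induction fuel with
  | zero =>
    intro r0 l sm mx hf hl hsm hmin h1 h2
    have hr : ¬ r0 < c.length := by omega
    rw [sweepB, if_neg hr]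
    constructor
    · rcases h1 with h | ⟨i, e, _, hok, heq⟩
      · exact Or.inl h
      · exact Or.inr ⟨i, e, hok, heq⟩
    · intro i e hok
      refine h2 i e hok ?_
      rcases hok with ⟨_, hb, _⟩; omega
  | succ n ih =>
    intro r0 l sm mx hf hl hsm hmin h1 h2
    by_cases hr : r0 < c.length
    · rw [sweepB, if_pos hr]
      dsimp only
      have hfn : c.length - (r0+1) ≤ n := by omega
      have hsm1 : sm + c.getD r0 0 = pref c (r0+1) - pref c l := by
        have := pref_succ c r0; omega
      have hmin1 : ∀ l' < l, leave < pref c (r0+1) - pref c l' := by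
        intro l' hl'
        have h3 := hmin l' hl'
        have h4 : pref c r0 ≤ pref c (r0+1) := pref_mono hn (by omega)
        omega
      obtain ⟨d1, d2, d3, d4, d5⟩ := drop_char leave c r0 l _ (by omega) hsm1 hmin1
      set p := dropB leave c r0 l (sm + c.getD r0 0) with hp
      by_cases hlen : (2 : Int) ≤ (r0 : Int) - (p.1 : Int) + 1
      · rw [if_pos hlen]
        have hp1r : p.1 + 2 ≤ r0 + 1 := by omega
        have hple : p.2 ≤ leave := by omega
        have hokp : Ok leave c p.1 (r0+1) := ⟨by omega, by omega, by omega⟩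
        refine ih (r0+1) p.1 p.2 _ hfn (by omega) d3 d4 ?_ ?_
        · rcases max_choice mx ((r0:Int) - (p.1:Int) + 1) with hm | hm
          · rw [hm]
            rcases h1 with h | ⟨i, e, he, hok, heq⟩
            · exact Or.inl h
            · exact Or.inr ⟨i, e, by omega, hok, heq⟩
          · rw [hm]
            exact Or.inr ⟨p.1, r0+1, by omega, hokp, by push_cast; ring⟩
        · intro i e hok he
          rcases Nat.lt_succ_iff_lt_or_eq.mp (Nat.lt_succ_of_le he) with hlt | rfl
          · exact le_trans (h2 i e hok (by omega)) (le_max_left _ _)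
          · have hip : p.1 ≤ i := by
              by_contra hip
              have := d4 i (by omega)
              rcases hok with ⟨_, _, h3⟩
              omega
            refine le_trans ?_ (le_max_right _ _)
            rcases hok with ⟨ha, _, _⟩
            omega
      · rw [if_neg hlen]
        refine ih (r0+1) p.1 p.2 _ hfn (by omega) d3 d4 ?_ ?_
        · rcases h1 with h | ⟨i, e, he, hok, heq⟩
          · exact Or.inl h
          · exact Or.inr ⟨i, e, by omega, hok, heq⟩
        · intro i e hok he
          rcases Nat.lt_succ_iff_lt_or_eq.mp (Nat.lt_succ_of_le he) with hlt | rfl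
          · exact h2 i e hok (by omega)
          · exfalso
            have hip : p.1 ≤ i := by
              by_contra hip
              have := d4 i (by omega)
              rcases hok with ⟨_, _, h3⟩
              omega
            rcases hok with ⟨ha, _, _⟩
            omega
    · rw [sweepB, if_neg hr]
      constructor
      · rcases h1 with h | ⟨i, e, _, hok, heq⟩
        · exact Or.inl h
        · exact Or.inr ⟨i, e, hok, heq⟩
      · intro i e hok
        refine h2 i e hok ?_
        rcases hok with ⟨_, hb, _⟩; omega

lemma best_unique (leave : Int) (c : List Int) {m m' : Int}
    (h1 : m = 0 ∨ ∃ i e, Ok leave c i e ∧ m = (e : Int) - (i : Int))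
    (h2 : ∀ i e, Ok leave c i e → (e : Int) - (i : Int) ≤ m)
    (h1' : m' = 0 ∨ ∃ i e, Ok leave c i e ∧ m' = (e : Int) - (i : Int))
    (h2' : ∀ i e, Ok leave c i e → (e : Int) - (i : Int) ≤ m') : m = m' := by
  rcases h1 with rfl | ⟨i, e, hok, rfl⟩ <;> rcases h1' with rfl | ⟨i', e', hok', rfl⟩
  · rfl
  · have := h2 i' e' hok'; rcases hok' with ⟨ha, _, _⟩; omega
  · have := h2' i e hok; rcases hok with ⟨ha, _, _⟩; omega
  · have := h2 i' e' hok'; have := h2' i e hok; omega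


-- ===== VERDICT (by name: the statement is the Claim_ definition above) =====
theorem solution_spec : Claim_equal_solution := by
  intro leave day holidays _ _
  unfold Spec_solution solution solution_alt
  have hn := buildCal_nonneg day holidays
  set c := buildCal day holidays with hc
  have hA := outer_char leave c hn 0 0 (Or.inl rfl) (by intro i e hi; omega)
  have hB := sweep_char leave c hn 0 0 0 0 (le_refl 0) (by simp [pref]) (by intro l' hl'; omega)
    (Or.inl rfl) (by intro i e hok he; rcases hok with ⟨h1, _, _⟩; omega)
  exact best_unique leave c hA.1 hA.2 hB.1 hB.2
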